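-- pv_equiv track=rewrite | github.com/shwetalj/executioner | bash_to_executioner.py | is_trivial_command
-- ===== SOURCE A (Python) =====
-- def is_trivial_command(command: str) -> bool:
--     """
--     Check if a command is trivial (like echo, printf, comment) and should be grouped.
--     """
--     cmd = command.strip()
--     trivial_commands = ['echo', 'printf', 'print', 'comment', '#']
--
--     # Check if command starts with any trivial command
--     for trivial in trivial_commands:
--         if cmd.startswith(trivial + ' ') or cmd.startswith(trivial + '\t'):
--             return True
--
--     # Also consider empty lines and comments as trivial
--     if not cmd or cmd.startswith('#'):
--         return True
--
--     return False
-- ===== SOURCE B (Python) =====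
-- def is_trivial_command(command: str) -> bool:
--     """
--     Check if a command is trivial (like echo, printf, comment) and should be grouped.
--     """
--     cmd = command.strip()
--     if not cmd or cmd.startswith('#'):
--         return True
--     idx = next((k for k, ch in enumerate(cmd) if ch in ' \t'), -1)
--     return idx >= 0 and cmd[:idx] in {'echo', 'printf', 'print', 'comment'}
-- ===== Notes on version B (the rewrite author's own statement) =====
-- stated objective: idiomatic
-- what changed: Instead of testing the stripped command against each of ten per-keyword prefixes (word+' ', word+'\t'), B hoists the empty/comment guard to the front, locates the first space-or-tab index in one search, slices the leading token, and decides with a single set membership test.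
import Mathlib
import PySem

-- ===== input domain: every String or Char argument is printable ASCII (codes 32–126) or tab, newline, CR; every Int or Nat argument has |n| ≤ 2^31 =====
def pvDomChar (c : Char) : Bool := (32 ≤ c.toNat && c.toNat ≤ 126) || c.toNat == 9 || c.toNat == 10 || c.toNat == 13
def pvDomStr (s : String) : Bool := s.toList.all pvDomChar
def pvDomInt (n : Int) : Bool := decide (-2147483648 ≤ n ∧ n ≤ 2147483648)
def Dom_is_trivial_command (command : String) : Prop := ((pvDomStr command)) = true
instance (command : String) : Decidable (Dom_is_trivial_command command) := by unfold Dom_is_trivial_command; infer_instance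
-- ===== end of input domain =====

-- B replaces A's ten per-keyword prefix tests by locating the first space/tab index,
-- slicing the leading token, and one set membership test (idiomatic; same return value).


-- ===== PORT A =====
-- the 'for trivial in trivial_commands' loop of A
def pvTrivLoop (cmd : List Char) : List (List Char) → Bool
  | [] => false
  | t :: rest =>
    if PySem.Chars.startswith cmd (t ++ [' ']) || PySem.Chars.startswith cmd (t ++ ['\t']) then
      true
    else pvTrivLoop cmd rest

def is_trivial_command (command : String) : Bool :=
  let cmd := PySem.Chars.strip command.toList
  if pvTrivLoop cmd [['e','c','h','o'], ['p','r','i','n','t','f'], ['p','r','i','n','t'],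
                     ['c','o','m','m','e','n','t'], ['#']] then true
  else if cmd.isEmpty || PySem.Chars.startswith cmd ['#'] then true
  else false

-- ===== PORT B =====
-- B: guard first; then idx = first index of a space/tab (-1 if none), slice the token, one lookup
def is_trivial_command_alt (command : String) : Bool :=
  let cmd := PySem.Chars.strip command.toList
  if cmd.isEmpty || PySem.Chars.startswith cmd ['#'] then true
  else
    let idx : Int :=
      match cmd.findIdx? (fun c => c == ' ' || c == '\t') with
      | some k => (k : Int)
      | none => -1
    decide (0 ≤ idx) &&
      [['e','c','h','o'], ['p','r','i','n','t','f'], ['p','r','i','n','t'],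
       ['c','o','m','m','e','n','t']].contains (cmd.take idx.toNat)

-- ===== PRECONDITION & SPEC =====
def Spec_is_trivial_command (command : String) (out : Bool) : Prop := out = is_trivial_command_alt command
instance (command : String) (out : Bool) : Decidable (Spec_is_trivial_command command out) := by unfold Spec_is_trivial_command; infer_instance

-- ===== CLAIM (what is proved, stated in full; the proofs are below) =====
def Claim_equal_is_trivial_command : Prop := ∀ (command : String), Dom_is_trivial_command command → Spec_is_trivial_command command (is_trivial_command command)

-- ===== LEMMAS AND PROOFS =====

-- the first-space/tab predicate both characterisations are phrased with
def pvWS (c : Char) : Bool := c == ' ' || c == '\t'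

theorem pvSwDec (l p : List Char) : PySem.Chars.startswith l p = decide (p <+: l) := by
  by_cases h : p <+: l
  · have hb : PySem.Chars.startswith l p = true := (PySem.Chars.startswith_iff _ _).mpr h
    simp [hb, h]
  · have hb : ¬ PySem.Chars.startswith l p = true := fun hb => h ((PySem.Chars.startswith_iff _ _).mp hb)
    simp [Bool.not_eq_true] at hb
    simp [hb, h]

theorem pvSw_eq (l : List Char) : ∀ (w : List Char), (∀ c ∈ w, pvWS c = false) →
    (PySem.Chars.startswith l (w ++ [' ']) || PySem.Chars.startswith l (w ++ ['\t'])) =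
    match l.findIdx? pvWS with
    | none => false
    | some i => decide (l.take i = w) := by
  induction l with
  | nil =>
    intro w _
    simp [pvSwDec]
  | cons c rest ih =>
    intro w hw
    by_cases h : pvWS c = true
    · have hne : ∀ x ∈ w, x ≠ c := by
        intro x hx hxc; have := hw x hx; rw [hxc] at this; rw [this] at h; exact absurd h (by simp)
      cases w with
      | nil =>
        simp [pvWS] at h
        simp [pvSwDec, List.findIdx?_cons, pvWS, List.cons_prefix_cons]
        rcases h with h | h <;> simp [h]
      | cons a w' =>
        have hac : a ≠ c := hne a (by simp)
        simp [pvSwDec, List.findIdx?_cons, h, List.cons_prefix_cons, hac]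
    · simp [pvWS] at h
      cases w with
      | nil =>
        simp [pvSwDec, List.findIdx?_cons, pvWS, h.1, h.2, List.cons_prefix_cons]
        cases hf : rest.findIdx? pvWS <;> simp <;>
          exact ⟨fun e => h.1 e.symm, fun e => h.2 e.symm⟩
      | cons a w' =>
        have ihw := ih w' (fun x hx => hw x (by simp [hx]))
        simp [pvSwDec, List.findIdx?_cons, pvWS, h.1, h.2, List.cons_prefix_cons] at ihw ⊢
        cases hf : rest.findIdx? pvWS with
        | none => simp [hf] at ihw ⊢; by_cases hca : c = a <;> simp [hca, ihw]
        | some i =>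
          simp [hf, List.take_succ_cons] at ihw ⊢
          by_cases hca : c = a <;> simp [hca, ihw]
          exact ⟨fun e => absurd e.symm hca, fun e => absurd e.symm hca⟩

theorem pvHash_starts (l : List Char)
    (h : (PySem.Chars.startswith l (['#'] ++ [' ']) || PySem.Chars.startswith l (['#'] ++ ['\t'])) = true) :
    PySem.Chars.startswith l ['#'] = true := by
  simp [pvSwDec] at h ⊢
  rcases h with h | h
  · exact List.IsPrefix.trans ⟨[' '], rfl⟩ h
  · exact List.IsPrefix.trans ⟨['\t'], rfl⟩ h

set_option maxRecDepth 8192 in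
theorem pvCore (cmd : List Char) :
    (if pvTrivLoop cmd [['e','c','h','o'], ['p','r','i','n','t','f'], ['p','r','i','n','t'],
                        ['c','o','m','m','e','n','t'], ['#']] then true
     else if cmd.isEmpty || PySem.Chars.startswith cmd ['#'] then true else false)
    = (if cmd.isEmpty || PySem.Chars.startswith cmd ['#'] then true
       else
         let idx : Int :=
           match cmd.findIdx? (fun c => c == ' ' || c == '\t') with
           | some k => (k : Int)
           | none => -1
         decide (0 ≤ idx) &&
           [['e','c','h','o'], ['p','r','i','n','t','f'], ['p','r','i','n','t'],
            ['c','o','m','m','e','n','t']].contains (cmd.take idx.toNat)) := by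
  by_cases hg : (cmd.isEmpty || PySem.Chars.startswith cmd ['#']) = true
  · simp [hg]
  · simp [Bool.not_eq_true] at hg
    simp [hg]
    have hH : (PySem.Chars.startswith cmd (['#'] ++ [' ']) || PySem.Chars.startswith cmd (['#'] ++ ['\t'])) = false := by
      cases hb : (PySem.Chars.startswith cmd (['#'] ++ [' ']) || PySem.Chars.startswith cmd (['#'] ++ ['\t'])) with
      | false => rfl
      | true =>
        have := pvHash_starts cmd hb
        simp [this] at hg
    have hT : pvTrivLoop cmd [['e','c','h','o'], ['p','r','i','n','t','f'], ['p','r','i','n','t'],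
                              ['c','o','m','m','e','n','t'], ['#']]
        = ((PySem.Chars.startswith cmd (['e','c','h','o'] ++ [' ']) || PySem.Chars.startswith cmd (['e','c','h','o'] ++ ['\t']))
          || ((PySem.Chars.startswith cmd (['p','r','i','n','t','f'] ++ [' ']) || PySem.Chars.startswith cmd (['p','r','i','n','t','f'] ++ ['\t']))
          || ((PySem.Chars.startswith cmd (['p','r','i','n','t'] ++ [' ']) || PySem.Chars.startswith cmd (['p','r','i','n','t'] ++ ['\t']))
          || (PySem.Chars.startswith cmd (['c','o','m','m','e','n','t'] ++ [' ']) || PySem.Chars.startswith cmd (['c','o','m','m','e','n','t'] ++ ['\t'])))))  := by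
      simp [pvTrivLoop]
      cases h1 : (PySem.Chars.startswith cmd (['e','c','h','o'] ++ [' ']) || PySem.Chars.startswith cmd (['e','c','h','o'] ++ ['\t'])) <;>
      cases h2 : (PySem.Chars.startswith cmd (['p','r','i','n','t','f'] ++ [' ']) || PySem.Chars.startswith cmd (['p','r','i','n','t','f'] ++ ['\t'])) <;>
      cases h3 : (PySem.Chars.startswith cmd (['p','r','i','n','t'] ++ [' ']) || PySem.Chars.startswith cmd (['p','r','i','n','t'] ++ ['\t'])) <;>
      cases h4 : (PySem.Chars.startswith cmd (['c','o','m','m','e','n','t'] ++ [' ']) || PySem.Chars.startswith cmd (['c','o','m','m','e','n','t'] ++ ['\t'])) <;>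
        simp_all
    rw [hT,
        pvSw_eq cmd ['e','c','h','o'] (by intro c hc; fin_cases hc <;> rfl),
        pvSw_eq cmd ['p','r','i','n','t','f'] (by intro c hc; fin_cases hc <;> rfl),
        pvSw_eq cmd ['p','r','i','n','t'] (by intro c hc; fin_cases hc <;> rfl),
        pvSw_eq cmd ['c','o','m','m','e','n','t'] (by intro c hc; fin_cases hc <;> rfl)]
    have hpred : (fun c => c == ' ' || c == '\t') = pvWS := by funext c; rfl
    rw [hpred]
    cases hf : cmd.findIdx? pvWS with
    | none => simp
    | some i => simp; rfl

-- ===== VERDICT (by name: the statement is the Claim_ definition above) =====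
theorem is_trivial_command_spec : Claim_equal_is_trivial_command := by
  intro command _
  unfold Spec_is_trivial_command is_trivial_command is_trivial_command_alt
  exact pvCore (PySem.Chars.strip command.toList)
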